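-- pv_equiv track=rewrite | github.com/Wim1201/ritsync | backend/services/rit_service.py | bereken_kilometers
-- ===== SOURCE A (Python) =====
-- def bereken_kilometers(adressen, startpunt="Dr. Kuyperstraat 5, Dongen"):
--     """
--     Simuleert afstanden tussen het startpunt en adressen (of tussen adressen onderling).
--     Voor nu gebruiken we vaste voorbeeldafstanden.
--     """
--     afstand_per_adres = {
--         "Rijen": 11,
--         "Tilburg": 20,
--         "Goirle": 25,
--         "Breda": 28,
--         "Haarlem": 130,
--         "Oud-Heusden": 38,
--         "Waalwijk": 30
--     }
--
--     totaal_km = 0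
--     resultaten = []
--
--     vorige = startpunt
--     for adres in adressen:
--         afstand = next((afstand_per_adres[plaats] for plaats in afstand_per_adres if plaats.lower() in adres.lower()), 5)
--         resultaten.append((vorige, adres, afstand))
--         totaal_km += afstand
--         vorige = adres
--
--     # Terug naar Dongen
--     resultaten.append((vorige, startpunt, 15))
--     totaal_km += 15
--
--     return resultaten, totaal_km
-- ===== SOURCE B (Python) =====
-- def bereken_kilometers(adressen, startpunt="Dr. Kuyperstraat 5, Dongen"):
--     """Builds the route back-to-front: walk the stops in reverse, carrying the
--     NEXT waypoint and the distance of the pending leg into it, append the legs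
--     in reverse order and flip the list once at the end."""
--     afstand_per_adres = {
--         "Rijen": 11,
--         "Tilburg": 20,
--         "Goirle": 25,
--         "Breda": 28,
--         "Haarlem": 130,
--         "Oud-Heusden": 38,
--         "Waalwijk": 30
--     }
--
--     def afstand(adres):
--         a = adres.lower()
--         for plaats, km in afstand_per_adres.items():
--             if plaats.lower() in a:
--                 return km
--         return 5
--
--     omgekeerd = []
--     totaal = 0
--     volgende, km = startpunt, 15
--     for adres in reversed(adressen):
--         omgekeerd.append((adres, volgende, km))
--         totaal += km
--         volgende, km = adres, afstand(adres)
--     omgekeerd.append((startpunt, volgende, km))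
--     totaal += km
--     omgekeerd.reverse()
--     return omgekeerd, totaal
-- ===== Notes on version B (the rewrite author's own statement) =====
-- stated objective: alternative
-- what changed: B builds the route back-to-front: it traverses the stops in reverse carrying the next waypoint and the pending leg distance (so the return leg's 15 is consumed first and the start leg is emitted last), appends legs in reverse order and reverses the list once, instead of A's forward pass with a vorige source accumulator and a running total.
import Mathlib
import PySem

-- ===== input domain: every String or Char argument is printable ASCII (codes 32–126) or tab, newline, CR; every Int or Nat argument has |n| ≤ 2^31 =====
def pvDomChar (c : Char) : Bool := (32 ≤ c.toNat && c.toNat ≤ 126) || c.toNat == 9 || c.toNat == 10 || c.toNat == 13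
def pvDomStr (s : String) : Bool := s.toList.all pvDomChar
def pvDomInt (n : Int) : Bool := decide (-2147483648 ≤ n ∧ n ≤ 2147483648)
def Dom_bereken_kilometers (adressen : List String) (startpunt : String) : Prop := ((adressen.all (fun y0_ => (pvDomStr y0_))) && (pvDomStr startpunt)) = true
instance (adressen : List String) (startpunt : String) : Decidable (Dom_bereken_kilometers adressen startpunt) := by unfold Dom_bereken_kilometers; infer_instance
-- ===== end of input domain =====

-- B builds the route back-to-front (reverse traversal carrying the NEXT waypoint and the
-- pending leg distance, one final reverse) instead of A's forward pass with a `vorige`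
-- source accumulator (objective: alternative, same cost).

-- ===== PORT A =====
-- the fixed dict afstand_per_adres
def pvAfstandDict : PySem.Dict String Int :=
  PySem.Dict.ofList [("Rijen", 11), ("Tilburg", 20), ("Goirle", 25), ("Breda", 28),
                     ("Haarlem", 130), ("Oud-Heusden", 38), ("Waalwijk", 30)]

def bereken_kilometers (adressen : List String) (startpunt : String) : (List (String × String × Int)) × Int :=
  -- loop state: (totaal_km, resultaten, vorige)
  let st := adressen.foldl
    (fun (st : Int × List (String × String × Int) × String) adres =>
      let afstand : Int :=
        -- next((afstand_per_adres[plaats] for plaats in afstand_per_adres if plaats.lower() in adres.lower()), 5)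
        match pvAfstandDict.keys.find?
            (fun plaats => PySem.Str.isIn (PySem.Str.lower plaats) (PySem.Str.lower adres)) with
        | some plaats => pvAfstandDict.getD plaats 0  -- found key, default never used
        | none => 5
      (st.1 + afstand, st.2.1 ++ [(st.2.2, adres, afstand)], adres))
    (0, [], startpunt)
  (st.2.1 ++ [(st.2.2, startpunt, 15)], st.1 + 15)

-- ===== PORT B =====
-- B's inner `afstand`: first matching (plaats, km) item of the dict, default 5
def pvAfstand (adres : String) : Int :=
  match (PySem.Dict.items pvAfstandDict).find?
      (fun p => PySem.Str.isIn (PySem.Str.lower p.1) (PySem.Str.lower adres)) with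
  | some p => p.2
  | none => 5

def bereken_kilometers_alt (adressen : List String) (startpunt : String) : (List (String × String × Int)) × Int :=
  -- loop state: (omgekeerd, totaal, volgende, km)
  let st := adressen.reverse.foldl
    (fun (st : List (String × String × Int) × Int × String × Int) adres =>
      (st.1 ++ [(adres, st.2.2.1, st.2.2.2)], st.2.1 + st.2.2.2, adres, pvAfstand adres))
    ([], 0, startpunt, 15)
  ((st.1 ++ [(startpunt, st.2.2.1, st.2.2.2)]).reverse, st.2.1 + st.2.2.2)

-- ===== PRECONDITION & SPEC =====
def Spec_bereken_kilometers (adressen : List String) (startpunt : String) (out : (List (String × String × Int)) × Int) : Prop := out = bereken_kilometers_alt adressen startpunt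
instance (adressen : List String) (startpunt : String) (out : (List (String × String × Int)) × Int) : Decidable (Spec_bereken_kilometers adressen startpunt out) := by unfold Spec_bereken_kilometers; infer_instance

-- ===== CLAIM (what is proved, stated in full; the proofs are below) =====
def Claim_equal_bereken_kilometers : Prop := ∀ (adressen : List String) (startpunt : String), Dom_bereken_kilometers adressen startpunt → Spec_bereken_kilometers adressen startpunt (bereken_kilometers adressen startpunt)

-- ===== LEMMAS AND PROOFS =====

-- proof-side specification: the route from `vorige` through the remaining stops
def pvRoute (startpunt : String) (vorige : String) :
    List String → (List (String × String × Int)) × Int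
  | [] => ([(vorige, startpunt, 15)], 15)
  | adres :: rest =>
      let km := pvAfstand adres
      let r := pvRoute startpunt adres rest
      ((vorige, adres, km) :: r.1, km + r.2)

-- A's per-address distance (first matching dict KEY, then dict lookup) equals B's
-- first matching ITEM's value
theorem afstand_eq (adres : String) :
    (match pvAfstandDict.keys.find?
        (fun plaats => PySem.Str.isIn (PySem.Str.lower plaats) (PySem.Str.lower adres)) with
      | some plaats => pvAfstandDict.getD plaats 0
      | none => (5 : Int)) = pvAfstand adres := by
  have hk : pvAfstandDict.keys = ["Rijen","Tilburg","Goirle","Breda","Haarlem","Oud-Heusden","Waalwijk"] := by decide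
  rw [hk]
  unfold pvAfstand
  have hi : PySem.Dict.items pvAfstandDict =
      [("Rijen",(11:Int)),("Tilburg",20),("Goirle",25),("Breda",28),("Haarlem",130),("Oud-Heusden",38),("Waalwijk",30)] := by decide
  rw [hi]
  simp only [List.find?]
  rcases h1 : PySem.Str.isIn (PySem.Str.lower "Rijen") (PySem.Str.lower adres) <;>
    rcases h2 : PySem.Str.isIn (PySem.Str.lower "Tilburg") (PySem.Str.lower adres) <;>
    rcases h3 : PySem.Str.isIn (PySem.Str.lower "Goirle") (PySem.Str.lower adres) <;>
    rcases h4 : PySem.Str.isIn (PySem.Str.lower "Breda") (PySem.Str.lower adres) <;>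
    rcases h5 : PySem.Str.isIn (PySem.Str.lower "Haarlem") (PySem.Str.lower adres) <;>
    rcases h6 : PySem.Str.isIn (PySem.Str.lower "Oud-Heusden") (PySem.Str.lower adres) <;>
    rcases h7 : PySem.Str.isIn (PySem.Str.lower "Waalwijk") (PySem.Str.lower adres) <;>
    rfl

-- A's fold (with the closing leg appended) equals the route spec, for any initial state
theorem foldA_route (sp : String) (l : List String) (t0 : Int)
    (r0 : List (String × String × Int)) (v : String) :
    ((l.foldl
        (fun (st : Int × List (String × String × Int) × String) adres =>
          (st.1 + pvAfstand adres, st.2.1 ++ [(st.2.2, adres, pvAfstand adres)], adres))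
        (t0, r0, v)).2.1
      ++ [((l.foldl
        (fun (st : Int × List (String × String × Int) × String) adres =>
          (st.1 + pvAfstand adres, st.2.1 ++ [(st.2.2, adres, pvAfstand adres)], adres))
        (t0, r0, v)).2.2, sp, 15)],
      (l.foldl
        (fun (st : Int × List (String × String × Int) × String) adres =>
          (st.1 + pvAfstand adres, st.2.1 ++ [(st.2.2, adres, pvAfstand adres)], adres))
        (t0, r0, v)).1 + 15)
    = (r0 ++ (pvRoute sp v l).1, t0 + (pvRoute sp v l).2) := by
  induction l generalizing t0 r0 v with
  | nil => simp [pvRoute]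
  | cons a l ih =>
    simp only [List.foldl_cons]
    rw [ih]
    simp [pvRoute]
    ring

-- B's backward fold: invariant relating its state to the route spec, for any leg source x
theorem foldB_route (sp : String) (l : List String) (x : String) :
    (((l.reverse.foldl
        (fun (st : List (String × String × Int) × Int × String × Int) adres =>
          (st.1 ++ [(adres, st.2.2.1, st.2.2.2)], st.2.1 + st.2.2.2, adres, pvAfstand adres))
        ([], 0, sp, 15)).1
      ++ [(x, (l.reverse.foldl
        (fun (st : List (String × String × Int) × Int × String × Int) adres =>
          (st.1 ++ [(adres, st.2.2.1, st.2.2.2)], st.2.1 + st.2.2.2, adres, pvAfstand adres))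
        ([], 0, sp, 15)).2.2.1, (l.reverse.foldl
        (fun (st : List (String × String × Int) × Int × String × Int) adres =>
          (st.1 ++ [(adres, st.2.2.1, st.2.2.2)], st.2.1 + st.2.2.2, adres, pvAfstand adres))
        ([], 0, sp, 15)).2.2.2)]).reverse,
      (l.reverse.foldl
        (fun (st : List (String × String × Int) × Int × String × Int) adres =>
          (st.1 ++ [(adres, st.2.2.1, st.2.2.2)], st.2.1 + st.2.2.2, adres, pvAfstand adres))
        ([], 0, sp, 15)).2.1 + (l.reverse.foldl
        (fun (st : List (String × String × Int) × Int × String × Int) adres =>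
          (st.1 ++ [(adres, st.2.2.1, st.2.2.2)], st.2.1 + st.2.2.2, adres, pvAfstand adres))
        ([], 0, sp, 15)).2.2.2)
    = pvRoute sp x l := by
  induction l generalizing x with
  | nil => simp [pvRoute]
  | cons a l ih =>
    simp only [List.reverse_cons, List.foldl_append, List.foldl_cons, List.foldl_nil, pvRoute]
    have h1 := congrArg Prod.fst (ih a)
    have h2 := congrArg Prod.snd (ih a)
    simp only at h1 h2
    refine Prod.ext ?_ ?_
    · rw [List.append_assoc, List.reverse_append, ← h1]
      simp
    · omega

theorem main (a : List String) (s : String) : bereken_kilometers a s = bereken_kilometers_alt a s := by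
  unfold bereken_kilometers bereken_kilometers_alt
  have hb : (fun (st : Int × List (String × String × Int) × String) adres =>
      let afstand : Int :=
        match pvAfstandDict.keys.find?
            (fun plaats => PySem.Str.isIn (PySem.Str.lower plaats) (PySem.Str.lower adres)) with
        | some plaats => pvAfstandDict.getD plaats 0
        | none => 5
      (st.1 + afstand, st.2.1 ++ [(st.2.2, adres, afstand)], adres))
      = (fun (st : Int × List (String × String × Int) × String) adres =>
        (st.1 + pvAfstand adres, st.2.1 ++ [(st.2.2, adres, pvAfstand adres)], adres)) := by
    funext st adres
    simp only [afstand_eq]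
  rw [hb]
  dsimp only
  rw [foldA_route s a 0 [] s]
  rw [← foldB_route s a s]
  simp

-- ===== VERDICT (by name: the statement is the Claim_ definition above) =====
theorem bereken_kilometers_spec : Claim_equal_bereken_kilometers := by
  intro a s _
  unfold Spec_bereken_kilometers
  exact main a s
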